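-- pv_equiv track=rewrite | github.com/akashvshroff/Puzzles_Challenges | strip_comments.py | solution
-- ===== SOURCE A (Python) =====
-- def solution(string, markers):
--     res = ''
--     mk_f = False
--     lines = string.split('\n')
--     for line in lines:
--         mk_f = False
--         for l in line:
--             if l in markers:
--                 res += line[:line.index(l)].strip()
--                 mk_f = True
--                 break
--         if not mk_f:
--             res += line
--         res += '\n'
--     return res[:-1]
-- ===== SOURCE B (Python) =====
-- def solution(string, markers):
--     results = []
--     buf = []
--     commented = False
--     for ch in string:
--         if ch == '\n':
--             results.append(''.join(buf).strip() if commented else ''.join(buf))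
--             buf = []
--             commented = False
--         elif commented:
--             pass
--         elif ch in markers:
--             commented = True
--         else:
--             buf.append(ch)
--     results.append(''.join(buf).strip() if commented else ''.join(buf))
--     return '\n'.join(results)
-- ===== Notes on version B (the rewrite author's own statement) =====
-- stated objective: alternative
-- what changed: B replaces A's split-into-lines-then-rescan-each-line structure (with a break flag and str.index re-finding the marker position) by a single streaming pass over the characters, maintaining a current-line buffer and a commented flag and flushing on each newline.
import Mathlib
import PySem

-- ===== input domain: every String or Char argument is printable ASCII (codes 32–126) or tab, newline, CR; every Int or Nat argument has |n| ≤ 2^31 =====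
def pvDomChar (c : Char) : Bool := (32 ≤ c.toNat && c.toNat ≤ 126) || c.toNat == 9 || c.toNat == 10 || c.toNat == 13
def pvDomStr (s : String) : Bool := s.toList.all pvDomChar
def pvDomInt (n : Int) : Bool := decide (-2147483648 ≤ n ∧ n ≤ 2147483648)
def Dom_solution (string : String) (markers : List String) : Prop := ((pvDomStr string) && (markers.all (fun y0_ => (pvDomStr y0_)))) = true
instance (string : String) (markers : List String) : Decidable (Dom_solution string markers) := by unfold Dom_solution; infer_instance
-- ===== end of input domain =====

-- B replaces A's split-into-lines + per-line rescan (with str.index re-finding the marker) by a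
-- single streaming pass over the characters with a current-line buffer and a commented flag
-- (objective: alternative decomposition, same cost).

-- ===== PORT A =====
-- the inner "for l in line: if l in markers: … break" loop of A
def pvScanA (line : List Char) (markers : List String) : List Char → Option (List Char)
  | [] => none
  | l :: rest =>
    if markers.contains (String.ofList [l]) then
      some (PySem.Chars.strip (PySem.List.slice line none (some (PySem.Chars.find line [l]))))
    else pvScanA line markers rest

def solution (string : String) (markers : List String) : String :=
  let lines := PySem.Chars.splitOn string.toList ['\n']
  let res := lines.foldl (fun res line =>
      (match pvScanA line markers line with
       | some cut => res ++ cut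
       | none => res ++ line) ++ ['\n']) []
  String.ofList (PySem.List.slice res none (some (-1)))

-- ===== PORT B =====
def pvFlushB (buf : List Char) (commented : Bool) : List Char :=
  if commented then PySem.Chars.strip buf else buf

def pvStepB (markers : List String) (st : List (List Char) × List Char × Bool) (c : Char) :
    List (List Char) × List Char × Bool :=
  if c = '\n' then (st.1 ++ [pvFlushB st.2.1 st.2.2], [], false)
  else if st.2.2 then st
  else if markers.contains (String.ofList [c]) then (st.1, st.2.1, true)
  else (st.1, st.2.1 ++ [c], st.2.2)

def solution_alt (string : String) (markers : List String) : String :=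
  let st := string.toList.foldl (pvStepB markers) ([], [], false)
  String.ofList (PySem.Chars.join ['\n'] (st.1 ++ [pvFlushB st.2.1 st.2.2]))

-- ===== PRECONDITION & SPEC =====
def Spec_solution (string : String) (markers : List String) (out : String) : Prop := out = solution_alt string markers
instance (string : String) (markers : List String) (out : String) : Decidable (Spec_solution string markers out) := by unfold Spec_solution; infer_instance

-- ===== CLAIM (what is proved, stated in full; the proofs are below) =====
def Claim_equal_solution : Prop := ∀ (string : String) (markers : List String), Dom_solution string markers → Spec_solution string markers (solution string markers)

-- ===== LEMMAS AND PROOFS =====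

-- structural form of splitting on '\n'
def pvSplitNl : List Char → List (List Char)
  | [] => [[]]
  | c :: rest => if c = '\n' then [] :: pvSplitNl rest
      else (pvSplitNl rest).modifyHead (c :: ·)

theorem pvSplitNl_ne_nil (cs : List Char) : pvSplitNl cs ≠ [] := by
  induction cs with
  | nil => simp [pvSplitNl]
  | cons c rest ih =>
    simp only [pvSplitNl]
    split_ifs
    · simp
    · cases h : pvSplitNl rest with
      | nil => exact absurd h ih
      | cons a t => simp

theorem pvSplitOn_go_eq (l : List Char) : ∀ (fuel : Nat), l.length ≤ fuel →
    ∀ (cur : List Char) (acc : List (List Char)),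
    PySem.Chars.splitOn.go ['\n'] fuel l cur acc
      = acc.reverse ++ (pvSplitNl l).modifyHead (cur.reverse ++ ·) := by
  induction l with
  | nil =>
    intro fuel _ cur acc
    cases fuel with
    | zero => rw [PySem.Chars.splitOn.go]; simp [pvSplitNl]
    | succ n =>
      rw [PySem.Chars.splitOn.go]
      simp [pvSplitNl]
      omega
  | cons c rest ih =>
    intro fuel hf cur acc
    cases fuel with
    | zero => simp at hf
    | succ f =>
      rw [PySem.Chars.splitOn.go]
      by_cases hc : c = '\n'
      · subst hc
        simp only [List.isPrefixOf, BEq.rfl, Bool.true_and, if_pos]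
        have hd : List.drop ['\n'].length ('\n' :: rest) = rest := rfl
        rw [hd, ih f (by simpa using hf) [] (cur.reverse :: acc)]
        simp [pvSplitNl]
        cases pvSplitNl rest <;> simp
      · have hpre : ['\n'].isPrefixOf (c :: rest) = false := by
          simp [List.isPrefixOf]; exact fun h => absurd h.symm hc
        rw [hpre]
        simp only [Bool.false_eq_true, if_false]
        rw [ih f (by simpa using hf) (c :: cur) acc]
        simp only [pvSplitNl, hc, if_false]
        cases h : pvSplitNl rest with
        | nil => exact absurd h (pvSplitNl_ne_nil rest)
        | cons a t => simp

theorem pvSplitOn_eq (cs : List Char) :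
    PySem.Chars.splitOn cs ['\n'] = pvSplitNl cs := by
  unfold PySem.Chars.splitOn
  rw [pvSplitOn_go_eq cs (cs.length + 1) (by omega) [] []]
  cases h : pvSplitNl cs <;> simp

-- A's per-line value
def pvProcA (markers : List String) (line : List Char) : List Char :=
  match pvScanA line markers line with
  | some cut => cut
  | none => line

-- A's fold builds the flatMap of per-line results each followed by '\n'
theorem pvAfold (markers : List String) (lines : List (List Char)) (acc : List Char) :
    lines.foldl (fun res line =>
      (match pvScanA line markers line with
       | some cut => res ++ cut
       | none => res ++ line) ++ ['\n']) acc
    = acc ++ lines.flatMap (fun line => pvProcA markers line ++ ['\n']) := by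
  induction lines generalizing acc with
  | nil => simp
  | cons l ls ih =>
    simp only [List.foldl_cons, List.flatMap_cons, ih]
    unfold pvProcA
    cases pvScanA l markers l <;> simp

theorem pvDropLast_flatMap (f : List Char → List Char) (ls : List (List Char)) (h : ls ≠ []) :
    (ls.flatMap (fun l => f l ++ ['\n'])).dropLast = PySem.Chars.join ['\n'] (ls.map f) := by
  induction ls with
  | nil => exact absurd rfl h
  | cons a t ih =>
    cases t with
    | nil => simp [PySem.Chars.join_singleton]
    | cons b t' =>
      have hne : (b :: t').flatMap (fun l => f l ++ ['\n']) ≠ [] := by simp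
      simp only [List.flatMap_cons] at hne ⊢
      rw [List.dropLast_append_of_ne_nil hne]
      rw [show (f b ++ ['\n'] ++ (t'.flatMap fun l => f l ++ ['\n'])) =
        ((b :: t').flatMap fun l => f l ++ ['\n']) by simp]
      rw [ih (by simp)]
      simp only [List.map_cons]
      rw [PySem.Chars.join_cons_cons]

-- B's in-line step (pvStepB on a non-newline char leaves results alone)
def pvStep2 (markers : List String) (st : List Char × Bool) (c : Char) : List Char × Bool :=
  if st.2 then st
  else if markers.contains (String.ofList [c]) then (st.1, true)
  else (st.1 ++ [c], st.2)

theorem pvStepB_of_ne (markers : List String) (rs : List (List Char)) (buf : List Char)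
    (com : Bool) (c : Char) (hc : c ≠ '\n') :
    pvStepB markers (rs, buf, com) c = (rs, pvStep2 markers (buf, com) c) := by
  simp only [pvStepB, pvStep2, hc, if_false]
  split_ifs <;> rfl

-- per-line result of B from a mid-line state
def pvG (markers : List String) (st : List Char × Bool) (line : List Char) : List Char :=
  let st' := line.foldl (pvStep2 markers) st
  pvFlushB st'.1 st'.2

def pvLines (markers : List String) (st : List Char × Bool) : List (List Char) → List (List Char)
  | [] => []
  | l :: ls => pvG markers st l :: ls.map (pvG markers ([], false))

theorem pvLines_start (markers : List String) (ls : List (List Char)) :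
    pvLines markers ([], false) ls = ls.map (pvG markers ([], false)) := by
  cases ls <;> simp [pvLines]

theorem pvBfold (markers : List String) (cs : List Char) :
    ∀ (rs : List (List Char)) (buf : List Char) (com : Bool),
    (cs.foldl (pvStepB markers) (rs, buf, com)).1
      ++ [pvFlushB (cs.foldl (pvStepB markers) (rs, buf, com)).2.1
                   (cs.foldl (pvStepB markers) (rs, buf, com)).2.2]
    = rs ++ pvLines markers (buf, com) (pvSplitNl cs) := by
  induction cs with
  | nil => intro rs buf com; simp [pvSplitNl, pvLines, pvG]
  | cons c rest ih =>
    intro rs buf com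
    by_cases hc : c = '\n'
    · subst hc
      have hstep : pvStepB markers (rs, buf, com) '\n' = (rs ++ [pvFlushB buf com], [], false) := by
        simp [pvStepB]
      simp only [List.foldl_cons, hstep]
      rw [ih (rs ++ [pvFlushB buf com]) [] false, pvLines_start,
        show pvSplitNl ('\n' :: rest) = [] :: pvSplitNl rest from by simp [pvSplitNl]]
      simp [pvLines, pvG, pvFlushB]
    · simp only [List.foldl_cons, pvStepB_of_ne markers rs buf com c hc]
      rw [ih rs (pvStep2 markers (buf, com) c).1 (pvStep2 markers (buf, com) c).2]
      simp only [pvSplitNl, hc, if_false]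
      cases h : pvSplitNl rest with
      | nil => exact absurd h (pvSplitNl_ne_nil rest)
      | cons a t =>
        simp [pvLines, pvG]

-- once commented, B keeps the buffer and strips it at flush
theorem pvG_commented (markers : List String) (buf : List Char) (suf : List Char) :
    pvG markers (buf, true) suf = PySem.Chars.strip buf := by
  induction suf with
  | nil => simp [pvG, pvFlushB]
  | cons c rest ih => simpa [pvG, pvStep2] using ih

-- Python's line.index(l): first occurrence of a fresh char after a clean prefix
theorem pvFind_go_fresh (c : Char) (rest : List Char) (pre : List Char) :
    ∀ (k : Nat), c ∉ pre →
    PySem.Chars.find.go [c] (pre ++ c :: rest) k = (k : Int) + pre.length := by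
  induction pre with
  | nil =>
    intro k _
    simp only [List.nil_append]
    rw [PySem.Chars.find.go]
    simp [List.isPrefixOf]
  | cons x pre' ih =>
    intro k hmem
    have hx : ¬ (x = c) := by intro h; exact hmem (by simp [h])
    rw [List.cons_append, PySem.Chars.find.go]
    have : [c].isPrefixOf (x :: (pre' ++ c :: rest)) = false := by
      simp [List.isPrefixOf]; exact fun h => absurd h.symm hx
    rw [this]
    simp only [Bool.false_eq_true, if_false]
    rw [ih (k + 1) (fun h => hmem (by simp [h]))]
    simp only [List.length_cons]
    push_cast; ring

theorem pvFind_fresh (c : Char) (rest : List Char) (pre : List Char) (h : c ∉ pre) :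
    PySem.Chars.find (pre ++ c :: rest) [c] = (pre.length : Int) := by
  unfold PySem.Chars.find
  rw [pvFind_go_fresh c rest pre 0 h]; simp

-- per-line agreement of B's streaming pass with A's scan
theorem pvLineAgree (markers : List String) (suf : List Char) :
    ∀ (pre : List Char), (∀ c ∈ pre, markers.contains (String.ofList [c]) = false) →
    pvG markers (pre, false) suf
      = (match pvScanA (pre ++ suf) markers suf with
         | some cut => cut
         | none => pre ++ suf) := by
  induction suf with
  | nil => intro pre _; simp [pvG, pvFlushB, pvScanA]
  | cons c rest ih =>
    intro pre hpre
    by_cases hm : markers.contains (String.ofList [c])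
    · have hnotin : c ∉ pre := fun h => by
        have := hpre c h; rw [this] at hm; cases hm
      simp only [pvScanA]
      rw [if_pos hm]
      have hstep : pvStep2 markers (pre, false) c = (pre, true) := by
        simp [pvStep2]
        simpa using hm
      have : pvG markers (pre, false) (c :: rest) = pvG markers (pre, true) rest := by
        simp [pvG, hstep]
      rw [this, pvG_commented]
      rw [pvFind_fresh c rest pre hnotin]
      rw [show ((pre.length : Int)) = ((pre.length : Nat) : Int) by simp,
        PySem.List.slice_to_natCast]
      simp
    · have hstep : pvStep2 markers (pre, false) c = (pre ++ [c], false) := by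
        simp [pvStep2]
        simpa using hm
      have hG : pvG markers (pre, false) (c :: rest) = pvG markers (pre ++ [c], false) rest := by
        simp [pvG, hstep]
      rw [hG, ih (pre ++ [c]) (by
        intro x hx
        rcases List.mem_append.mp hx with h | h
        · exact hpre x h
        · simp at h; subst h; simpa using hm)]
      simp only [pvScanA]
      rw [if_neg hm]
      rw [show pre ++ c :: rest = (pre ++ [c]) ++ rest by simp]

-- ===== VERDICT (by name: the statement is the Claim_ definition above) =====
theorem solution_spec : Claim_equal_solution := by
  intro string markers _
  unfold Spec_solution
  simp only [solution, solution_alt]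
  rw [pvSplitOn_eq, pvAfold, List.nil_append, PySem.List.slice_to_neg_one,
    pvDropLast_flatMap (pvProcA markers) _ (pvSplitNl_ne_nil _)]
  rw [pvBfold markers string.toList [] [] false, List.nil_append, pvLines_start]
  congr 2
  apply List.map_congr_left
  intro line _
  rw [pvLineAgree markers line [] (by simp)]
  simp [pvProcA]
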